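-- pv_equiv track=rewrite | github.com/pypi-data/pypi-mirror-402 | packages/kouchou-ai-analysis-core/kouchou_ai_analysis_core-0.1.0.tar.gz/kouchou_ai_analysis_core-0.1.0/src/analysis_core/core/utils.py | messages
-- ===== SOURCE A (Python) =====
-- def typed_message(t: str, m: str) -> dict[str, str]:
--     """
--     Convert a message type and content to OpenAI message format.
--
--     Args:
--         t: Message type ('system', 'human', or 'ai')
--         m: Message content
--
--     Returns:
--         OpenAI-compatible message dictionary
--
--     Raises:
--         Exception: If message type is unknown
--     """
--     if t == "system":
--         return {"role": "system", "content": m}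
--     if t == "human":
--         return {"role": "user", "content": m}
--     if t == "ai":
--         return {"role": "assistant", "content": m}
--     raise Exception(f"Unknown message type in prompt: {t}")
--
-- def messages(prompt: str, input_text: str) -> list[dict[str, str]]:
--     """
--     Parse a prompt template into OpenAI-compatible messages.
--
--     The prompt format supports /system, /human, and /ai markers:
--     ```
--     /system
--     You are a helpful assistant.
--
--     /human
--     Please analyze this text.
--     ```
--
--     Args:
--         prompt: The prompt template with markers
--         input_text: The user input to append
--
--     Returns:
--         List of OpenAI-compatible message dictionaries
--     """
--     lines = prompt.strip().splitlines()
--     results: list[tuple[str, str]] = []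
--     t: str | None = None
--     m = ""
--
--     for line in lines:
--         if line.startswith("/"):
--             if t is not None:
--                 results.append((t, m))
--             t = line[1:].strip()
--             m = ""
--         else:
--             m += line + "\n"
--
--     if t is not None:
--         results.append((t, m))
--
--     results.append(("human", input_text))
--
--     return [typed_message(t, m) for (t, m) in results]
-- ===== SOURCE B (Python) =====
-- def typed_message(t: str, m: str) -> dict[str, str]:
--     if t == "system":
--         return {"role": "system", "content": m}
--     if t == "human":
--         return {"role": "user", "content": m}
--     if t == "ai":
--         return {"role": "assistant", "content": m}
--     raise Exception(f"Unknown message type in prompt: {t}")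
--
--
-- def _skip_preamble(lines):
--     """Drop everything before the first '/' marker line."""
--     while lines and not lines[0].startswith("/"):
--         lines = lines[1:]
--     return lines
--
--
-- def _span_content(lines):
--     """Split lines into (the content lines before the next marker, the rest)."""
--     k = 0
--     while k < len(lines) and not lines[k].startswith("/"):
--         k += 1
--     return lines[:k], lines[k:]
--
--
-- def messages(prompt: str, input_text: str) -> list[dict[str, str]]:
--     lines = prompt.strip().splitlines()
--     # partition: repeatedly cut off one marker line and its content segment
--     pairs = []
--     rest = _skip_preamble(lines)
--     while rest:
--         head, rest = rest[0], rest[1:]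
--         body, rest = _span_content(rest)
--         pairs.append((head[1:].strip(), "".join(l + "\n" for l in body)))
--     pairs.append(("human", input_text))
--     # map: render every (type, content) pair
--     return [typed_message(t, m) for t, m in pairs]
-- ===== Notes on version B (the rewrite author's own statement) =====
-- stated objective: alternative
-- what changed: Replaces A's single scan with a running (results, t, m) accumulator and final flush by a partition-then-map decomposition: drop the pre-marker preamble, repeatedly cut off one marker line plus its content segment into (name, content) groups, join each segment's lines, then map all pairs through typed_message.
import Mathlib
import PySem

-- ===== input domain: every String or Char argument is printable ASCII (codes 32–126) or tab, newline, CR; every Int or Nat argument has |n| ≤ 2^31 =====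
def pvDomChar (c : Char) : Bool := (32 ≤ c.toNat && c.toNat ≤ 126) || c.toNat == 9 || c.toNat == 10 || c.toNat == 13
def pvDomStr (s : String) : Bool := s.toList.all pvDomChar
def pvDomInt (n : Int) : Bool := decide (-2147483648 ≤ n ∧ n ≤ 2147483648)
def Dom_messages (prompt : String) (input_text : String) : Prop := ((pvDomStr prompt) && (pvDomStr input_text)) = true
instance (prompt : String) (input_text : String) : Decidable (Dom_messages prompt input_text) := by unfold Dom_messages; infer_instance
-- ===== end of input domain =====

-- B replaces A's scan-with-accumulator by a partition-then-map decomposition (same cost); equivalence proved on prompts whose markers are all known (elsewhere the Python raises).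


-- ===== PORT A =====
-- typed_message; on an unknown type Python raises Exception — excluded by Pre_messages, the port returns [] there
def typedMessage (t : String) (m : String) : List (String × String) :=
  if t = "system" then [("role", "system"), ("content", m)]
  else if t = "human" then [("role", "user"), ("content", m)]
  else if t = "ai" then [("role", "assistant"), ("content", m)]
  else []

-- loop body of A: state = (results, t, m); t = none is Python's  t: str | None = None
def stepA (acc : List (String × String) × Option String × String) (line : String) :
    List (String × String) × Option String × String :=
  if PySem.Str.startswith line "/" then
    ((match acc.2.1 with
      | some t => acc.1 ++ [(t, acc.2.2)]
      | none => acc.1),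
     some (PySem.Str.strip (PySem.Str.slice line (some 1) none)), "")
  else
    (acc.1, acc.2.1, acc.2.2 ++ (line ++ "\n"))

-- the trailing  if t is not None: results.append((t, m))
def flushA (st : List (String × String) × Option String × String) : List (String × String) :=
  match st.2.1 with
  | some t => st.1 ++ [(t, st.2.2)]
  | none => st.1

def messages (prompt : String) (input_text : String) : List (List (String × String)) :=
  let lines := PySem.Str.splitlines (PySem.Str.strip prompt)
  let st := lines.foldl stepA ([], none, "")
  let results := flushA st ++ [("human", input_text)]
  results.map (fun p => typedMessage p.1 p.2)

-- ===== PORT B =====  (typed_message is unchanged in B and shared: typedMessage above)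
-- _skip_preamble: drop everything before the first '/' marker line
def skipPreambleB : List String → List String
  | [] => []
  | l :: ls => if PySem.Str.startswith l "/" then l :: ls else skipPreambleB ls

-- _span_content: the index scan computes k = number of leading non-marker lines; lines[:k], lines[k:]
def spanContentB (lines : List String) : List String × List String :=
  (lines.takeWhile (fun l => !PySem.Str.startswith l "/"),
   lines.dropWhile (fun l => !PySem.Str.startswith l "/"))

-- the  while rest:  partition loop building (name, content) pairs
def buildPairsB : List String → List (String × String)
  | [] => []
  | head :: rest =>
    let p := spanContentB rest
    (PySem.Str.strip (PySem.Str.slice head (some 1) none),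
     PySem.Str.join "" (p.1.map (fun l => l ++ "\n"))) :: buildPairsB p.2
termination_by lines => lines.length
decreasing_by
  simp only [spanContentB]
  exact Nat.lt_succ_of_le (List.length_dropWhile_le _ _)

def messages_alt (prompt : String) (input_text : String) : List (List (String × String)) :=
  let lines := PySem.Str.splitlines (PySem.Str.strip prompt)
  let pairs := buildPairsB (skipPreambleB lines) ++ [("human", input_text)]
  pairs.map (fun p => typedMessage p.1 p.2)

-- ===== PRECONDITION & SPEC =====
-- Pre_ excludes exactly the prompts with a marker line whose name is not system/human/ai: there Python's typed_message raises Exception.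
def Pre_messages (prompt : String) (_input_text : String) : Prop :=
  ∀ line ∈ PySem.Str.splitlines (PySem.Str.strip prompt),
    PySem.Str.startswith line "/" = true →
      PySem.Str.strip (PySem.Str.slice line (some 1) none) ∈ (["system", "human", "ai"] : List String)
instance (prompt : String) (input_text : String) : Decidable (Pre_messages prompt input_text) := by
  unfold Pre_messages; infer_instance

def pvWitness_messages : String × String :=
  ("/system\nYou are a helpful assistant.\n\n/human\nPlease analyze this text.", "some user input")

def Spec_messages (prompt : String) (input_text : String) (out : List (List (String × String))) : Prop := out = messages_alt prompt input_text
instance (prompt : String) (input_text : String) (out : List (List (String × String))) : Decidable (Spec_messages prompt input_text out) := by unfold Spec_messages; infer_instance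

-- ===== CLAIM (what is proved, stated in full; the proofs are below) =====
def Claim_equal_messages : Prop := ∀ (prompt : String) (input_text : String), Dom_messages prompt input_text → Pre_messages prompt input_text → Spec_messages prompt input_text (messages prompt input_text)

-- ===== LEMMAS AND PROOFS =====

theorem join_empty_nil : PySem.Str.join "" ([] : List String) = "" := by decide

theorem join_empty_cons (x : String) (xs : List String) :
    PySem.Str.join "" (x :: xs) = x ++ PySem.Str.join "" xs := by
  apply String.toList_inj.mp
  simp only [PySem.Str.toList_join, String.toList_append]
  cases xs with
  | nil => simp [PySem.Chars.join_singleton, PySem.Chars.join_nil]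
  | cons y ys => simp [PySem.Chars.join_cons_cons]

theorem buildPairsB_cons (head : String) (rest : List String) :
    buildPairsB (head :: rest) =
      (PySem.Str.strip (PySem.Str.slice head (some 1) none),
       PySem.Str.join "" ((rest.takeWhile (fun l => !PySem.Str.startswith l "/")).map (fun l => l ++ "\n")))
        :: buildPairsB (rest.dropWhile (fun l => !PySem.Str.startswith l "/")) := by
  rw [buildPairsB]
  simp [spanContentB]

-- A's scan from a  t = some t  state produces the pending pair (closed with the upcoming content) then B's remaining groups.
theorem foldA_some (ls : List String) :
    ∀ (res : List (String × String)) (t m : String),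
      flushA (ls.foldl stepA (res, some t, m)) =
        res ++ (t, m ++ PySem.Str.join "" ((ls.takeWhile (fun l => !PySem.Str.startswith l "/")).map (fun l => l ++ "\n")))
          :: buildPairsB (ls.dropWhile (fun l => !PySem.Str.startswith l "/")) := by
  induction ls with
  | nil =>
    intro res t m
    simp [flushA, join_empty_nil, String.append_empty, buildPairsB]
  | cons l ls ih =>
    intro res t m
    by_cases hP : PySem.Str.startswith l "/" = true
    · simp only [List.foldl_cons, stepA, List.takeWhile_cons, List.dropWhile_cons,
        hP, Bool.not_true, Bool.false_eq_true, reduceIte]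
      rw [ih]
      rw [buildPairsB_cons]
      simp [join_empty_nil, String.append_empty, String.empty_append]
    · rw [Bool.not_eq_true] at hP
      simp only [List.foldl_cons, stepA, hP, Bool.false_eq_true, reduceIte,
        List.takeWhile_cons, List.dropWhile_cons, Bool.not_false]
      rw [ih]
      simp only [List.map_cons]
      rw [join_empty_cons]
      simp [String.append_assoc]

-- A's scan from the initial  t = none  state produces exactly B's groups.
theorem foldA_none (ls : List String) :
    ∀ (res : List (String × String)) (m : String),
      flushA (ls.foldl stepA (res, none, m)) = res ++ buildPairsB (skipPreambleB ls) := by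
  induction ls with
  | nil => intro res m; simp [flushA, skipPreambleB, buildPairsB]
  | cons l ls ih =>
    intro res m
    by_cases hP : PySem.Str.startswith l "/" = true
    · simp only [List.foldl_cons, stepA, hP, skipPreambleB, if_true]
      rw [foldA_some]
      rw [buildPairsB_cons]
      simp [String.empty_append]
    · rw [Bool.not_eq_true] at hP
      simp only [List.foldl_cons, stepA, hP, Bool.false_eq_true, reduceIte, skipPreambleB]
      exact ih res _

-- ===== VERDICT (by name: the statement is the Claim_ definition above) =====
theorem messages_spec : Claim_equal_messages := by
  intro prompt input_text _ _
  unfold Spec_messages messages messages_alt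
  dsimp only
  rw [foldA_none _ [] ""]
  rfl
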